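-- pv_equiv track=rewrite | github.com/pypi-data/pypi-mirror-290 | packages/rst-fast-parse/rst_fast_parse-0.0.11-py3-none-any.whl/rst_fast_parse/_opqrstu/rrrrrrrr.py | gAAAAABmuqBgrHH9Mv_plVN1LzgVJw5afJ5Z_2Dnqo3IOEmV_M0NPg3QbGMY1ePWKWYvMw5pa0QGhqu0MVmzuu52Gf5TjvxYPQ__
-- ===== SOURCE A (Python) =====
-- from typing import NewType
--
-- EscapedStr = NewType('EscapedStr', str)
--
-- def gAAAAABmuqBgrHH9Mv_plVN1LzgVJw5afJ5Z_2Dnqo3IOEmV_M0NPg3QbGMY1ePWKWYvMw5pa0QGhqu0MVmzuu52Gf5TjvxYPQ__(text: str) -> EscapedStr: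
--     parts = []
--     start = 0
--     while True:
--         found = text.find('\\', start)
--         if found == -1:
--             parts.append(text[start:])
--             return EscapedStr(''.join(parts))
--         parts.append(text[start:found])
--         parts.append('\x00' + text[found + 1:found + 2])
--         start = found + 2
-- ===== SOURCE B (Python) =====
-- from typing import NewType
--
-- EscapedStr = NewType('EscapedStr', str)
--
-- def gAAAAABmuqBgrHH9Mv_plVN1LzgVJw5afJ5Z_2Dnqo3IOEmV_M0NPg3QbGMY1ePWKWYvMw5pa0QGhqu0MVmzuu52Gf5TjvxYPQ__(text: str) -> EscapedStr:
--     out = []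
--     it = iter(text)
--     for ch in it:
--         if ch == '\\':
--             out.append('\x00' + next(it, ''))
--         else:
--             out.append(ch)
--     return EscapedStr(''.join(out))
-- ===== Notes on version B (the rewrite author's own statement) =====
-- stated objective: alternative
-- what changed: Replaces the find/slice chunk loop (repeated str.find plus slicing) with a single character-at-a-time scan over an iterator that consumes the escaped character directly.
import Mathlib
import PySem

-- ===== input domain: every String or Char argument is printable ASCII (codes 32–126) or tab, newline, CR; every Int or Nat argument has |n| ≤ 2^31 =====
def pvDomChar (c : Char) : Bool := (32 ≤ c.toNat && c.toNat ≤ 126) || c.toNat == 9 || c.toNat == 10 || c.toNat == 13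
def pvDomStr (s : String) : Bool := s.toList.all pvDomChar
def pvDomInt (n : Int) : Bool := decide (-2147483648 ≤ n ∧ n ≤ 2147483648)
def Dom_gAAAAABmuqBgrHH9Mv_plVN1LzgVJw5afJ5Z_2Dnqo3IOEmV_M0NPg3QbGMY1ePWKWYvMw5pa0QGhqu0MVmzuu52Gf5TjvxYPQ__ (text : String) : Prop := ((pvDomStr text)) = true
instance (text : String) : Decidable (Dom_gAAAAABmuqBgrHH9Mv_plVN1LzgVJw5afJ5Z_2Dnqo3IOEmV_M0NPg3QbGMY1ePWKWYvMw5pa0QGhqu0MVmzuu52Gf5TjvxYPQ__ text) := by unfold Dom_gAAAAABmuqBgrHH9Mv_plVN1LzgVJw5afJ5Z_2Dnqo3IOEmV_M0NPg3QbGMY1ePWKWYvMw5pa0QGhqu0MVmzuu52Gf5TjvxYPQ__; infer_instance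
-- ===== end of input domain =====

-- B replaces A's find/slice chunk loop with a single char-at-a-time scan; return values proved equal.

-- ===== PORT A =====
-- Bounds on str.find's result, used only for the loop's termination measure.
lemma pvFindBounds (cs : List Char) (k : Nat)
    (h : PySem.Chars.findFrom cs ['\\'] (k : Int) ≠ -1) :
    (k : Int) ≤ PySem.Chars.findFrom cs ['\\'] (k : Int) ∧
      (PySem.Chars.findFrom cs ['\\'] (k : Int)).toNat < cs.length := by
  by_cases hk : k ≤ cs.length
  · obtain ⟨h1, h2, _⟩ := PySem.Chars.findFrom_natCast_spec cs ['\\'] k hk h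
    refine ⟨h1, ?_⟩
    by_contra hlen
    have : cs.drop (PySem.Chars.findFrom cs ['\\'] (k : Int)).toNat = [] :=
      List.drop_eq_nil_of_le (by omega)
    rw [this] at h2
    exact absurd (List.prefix_nil.mp h2) (by simp)
  · exfalso
    apply h
    simp only [PySem.Chars.findFrom]
    rw [if_neg (show ¬((k : Int) < 0) by omega),
      if_pos (show ((cs.length : Int)) < (k : Int) by exact_mod_cast Nat.lt_of_not_le hk)]

-- A's while-True loop: find the next backslash, append the chunk before it and
-- '\x00' + the following character, continue after them; join at the end.
def pvLoopA (cs : List Char) (parts : List (List Char)) (start : Nat) : List Char :=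
  if h : PySem.Chars.findFrom cs ['\\'] (start : Int) = -1 then
    PySem.Chars.join [] (parts ++ [PySem.Chars.slice cs (some (start : Int)) none])
  else
    pvLoopA cs
      (parts ++ [PySem.Chars.slice cs (some (start : Int)) (some (PySem.Chars.findFrom cs ['\\'] (start : Int))),
        Char.ofNat 0 :: PySem.Chars.slice cs (some (PySem.Chars.findFrom cs ['\\'] (start : Int) + 1))
          (some (PySem.Chars.findFrom cs ['\\'] (start : Int) + 2))])
      ((PySem.Chars.findFrom cs ['\\'] (start : Int)).toNat + 2)
termination_by cs.length + 1 - start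
decreasing_by
  have hb := pvFindBounds cs start h
  omega

def gAAAAABmuqBgrHH9Mv_plVN1LzgVJw5afJ5Z_2Dnqo3IOEmV_M0NPg3QbGMY1ePWKWYvMw5pa0QGhqu0MVmzuu52Gf5TjvxYPQ__ (text : String) : String :=
  String.mk (pvLoopA text.toList [] 0)

-- ===== PORT B =====
-- B: one pass; a backslash emits NUL and consumes the next character (if any).
def pvEscape : List Char → List Char
  | [] => []
  | c :: rest =>
    if c = '\\' then
      match rest with
      | [] => [Char.ofNat 0]
      | d :: rest' => Char.ofNat 0 :: d :: pvEscape rest'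
    else c :: pvEscape rest

def gAAAAABmuqBgrHH9Mv_plVN1LzgVJw5afJ5Z_2Dnqo3IOEmV_M0NPg3QbGMY1ePWKWYvMw5pa0QGhqu0MVmzuu52Gf5TjvxYPQ___alt (text : String) : String :=
  String.mk (pvEscape text.toList)

-- ===== PRECONDITION & SPEC =====
def Spec_gAAAAABmuqBgrHH9Mv_plVN1LzgVJw5afJ5Z_2Dnqo3IOEmV_M0NPg3QbGMY1ePWKWYvMw5pa0QGhqu0MVmzuu52Gf5TjvxYPQ__ (text : String) (out : String) : Prop := out = gAAAAABmuqBgrHH9Mv_plVN1LzgVJw5afJ5Z_2Dnqo3IOEmV_M0NPg3QbGMY1ePWKWYvMw5pa0QGhqu0MVmzuu52Gf5TjvxYPQ___alt text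
instance (text : String) (out : String) : Decidable (Spec_gAAAAABmuqBgrHH9Mv_plVN1LzgVJw5afJ5Z_2Dnqo3IOEmV_M0NPg3QbGMY1ePWKWYvMw5pa0QGhqu0MVmzuu52Gf5TjvxYPQ__ text out) := by unfold Spec_gAAAAABmuqBgrHH9Mv_plVN1LzgVJw5afJ5Z_2Dnqo3IOEmV_M0NPg3QbGMY1ePWKWYvMw5pa0QGhqu0MVmzuu52Gf5TjvxYPQ__; infer_instance

-- ===== CLAIM (what is proved, stated in full; the proofs are below) =====
def Claim_equal_gAAAAABmuqBgrHH9Mv_plVN1LzgVJw5afJ5Z_2Dnqo3IOEmV_M0NPg3QbGMY1ePWKWYvMw5pa0QGhqu0MVmzuu52Gf5TjvxYPQ__ : Prop := ∀ (text : String), Dom_gAAAAABmuqBgrHH9Mv_plVN1LzgVJw5afJ5Z_2Dnqo3IOEmV_M0NPg3QbGMY1ePWKWYvMw5pa0QGhqu0MVmzuu52Gf5TjvxYPQ__ text → Spec_gAAAAABmuqBgrHH9Mv_plVN1LzgVJw5afJ5Z_2Dnqo3IOEmV_M0NPg3QbGMY1ePWKWYvMw5pa0QGhqu0MVmzuu52Gf5TjvxYPQ__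 text (gAAAAABmuqBgrHH9Mv_plVN1LzgVJw5afJ5Z_2Dnqo3IOEmV_M0NPg3QbGMY1ePWKWYvMw5pa0QGhqu0MVmzuu52Gf5TjvxYPQ__ text)

-- ===== LEMMAS AND PROOFS =====
lemma pvJoinNil (parts : List (List Char)) : PySem.Chars.join [] parts = parts.flatten := by
  induction parts with
  | nil => simp [PySem.Chars.join, List.intercalate]
  | cons p ps ih =>
    cases ps with
    | nil => simp [PySem.Chars.join, List.intercalate]
    | cons q qs =>
      simp only [PySem.Chars.join, List.intercalate] at *
      simp [List.intersperse] at *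
      simpa using ih

lemma pvEscape_no_bs (l : List Char) (h : '\\' ∉ l) : pvEscape l = l := by
  induction l with
  | nil => rfl
  | cons c rest ih =>
    have hc : c ≠ '\\' := fun hc => h (hc ▸ List.mem_cons_self ..)
    have hr : '\\' ∉ rest := fun hm => h (List.mem_cons_of_mem _ hm)
    rw [pvEscape.eq_def]
    simp [hc, ih hr]

lemma pvEscape_split (pre rest : List Char) (h : '\\' ∉ pre) :
    pvEscape (pre ++ '\\' :: rest)
      = pre ++ (Char.ofNat 0 :: rest.take 1) ++ pvEscape (rest.drop 1) := by
  induction pre with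
  | nil =>
    cases rest with
    | nil => simp [pvEscape]
    | cons d r => simp [pvEscape]
  | cons c pre' ih =>
    have hc : c ≠ '\\' := fun hc => h (hc ▸ List.mem_cons_self ..)
    have hp : '\\' ∉ pre' := fun hm => h (List.mem_cons_of_mem _ hm)
    simp only [List.cons_append]
    rw [pvEscape.eq_def]
    simp [hc, ih hp]

lemma pvNoBsDrop (cs : List Char) (start : Nat)
    (h : PySem.Chars.findFrom cs ['\\'] (start : Int) = -1) : '\\' ∉ cs.drop start := by
  by_cases hk : start ≤ cs.length
  · have := (PySem.Chars.findFrom_natCast_eq_neg_one_iff cs ['\\'] start hk).mp h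
    intro hm
    exact this ((List.singleton_infix_iff _ _).mpr hm)
  · rw [List.drop_eq_nil_of_le (by omega)]
    simp

lemma pvLoopA_eq (cs : List Char) (parts : List (List Char)) (start : Nat) :
    pvLoopA cs parts start = parts.flatten ++ pvEscape (cs.drop start) := by
  induction parts, start using pvLoopA.induct cs with
  | case1 parts start h =>
    rw [pvLoopA]
    rw [dif_pos h]
    rw [pvJoinNil, List.flatten_append]
    rw [pvEscape_no_bs _ (pvNoBsDrop cs start h)]
    simp [PySem.Chars.slice_eq_listSlice, PySem.List.slice_from_natCast]
  | case2 parts start h ih =>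
    rw [pvLoopA]
    rw [dif_neg h]
    rw [ih]
    -- facts about the found index
    have hk : start ≤ cs.length := by
      by_contra hk
      apply h
      simp only [PySem.Chars.findFrom]
      rw [if_neg (show ¬((start : Int) < 0) by omega),
        if_pos (show ((cs.length : Int)) < (start : Int) by exact_mod_cast Nat.lt_of_not_le hk)]
    obtain ⟨h1, h2, h3⟩ := PySem.Chars.findFrom_natCast_spec cs ['\\'] start hk h
    have hb := pvFindBounds cs start h
    set f := PySem.Chars.findFrom cs ['\\'] (start : Int) with hf
    have hf0 : 0 ≤ f := le_trans (by exact_mod_cast Nat.zero_le start) h1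
    have hft : f = ((f.toNat : Nat) : Int) := by omega
    have hst : start ≤ f.toNat := by omega
    have hfl : f.toNat < cs.length := hb.2
    -- cs[f.toNat] = '\\'
    have hdropf : cs.drop f.toNat = '\\' :: cs.drop (f.toNat + 1) := by
      obtain ⟨t, ht⟩ := h2
      have h4 : cs.drop f.toNat = '\\' :: t := by simpa using ht.symm
      have h5 : cs.drop (f.toNat + 1) = t := by
        rw [← List.tail_drop, h4]; simp
      rw [h4, h5]
    -- split cs.drop start around the backslash
    have hpre : '\\' ∉ (cs.drop start).take (f.toNat - start) := by
      intro hm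
      obtain ⟨j, hj, hget⟩ := List.getElem_of_mem hm
      have hjlt : j < f.toNat - start := lt_of_lt_of_le hj (by simp [List.length_take])
      have hgd : ((cs.drop start).take (f.toNat - start))[j] = cs[start + j]'(by omega) := by
        rw [List.getElem_take, List.getElem_drop]
      apply h3 (start + j) (by omega) (by omega)
      have hdj : cs.drop (start + j) = '\\' :: cs.drop (start + j + 1) := by
        rw [List.drop_eq_getElem_cons (by omega)]
        rw [← hgd, hget]
      rw [hdj]
      exact ⟨_, rfl⟩
    have hsplit : cs.drop start
        = (cs.drop start).take (f.toNat - start) ++ '\\' :: cs.drop (f.toNat + 1) := by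
      conv_lhs => rw [← List.take_append_drop (f.toNat - start) (cs.drop start)]
      rw [List.drop_drop]
      rw [show start + (f.toNat - start) = f.toNat from by omega, hdropf]
    rw [hsplit, pvEscape_split _ _ hpre]
    -- rewrite the slices
    rw [hft]
    have hs1 : PySem.Chars.slice cs (some (start : Int)) (some ((f.toNat : Nat) : Int))
        = (cs.drop start).take (f.toNat - start) := by
      simp only [PySem.Chars.slice_eq_listSlice]
      rw [PySem.List.slice_natCast]
    have hs2 : PySem.Chars.slice cs (some (((f.toNat : Nat) : Int) + 1)) (some (((f.toNat : Nat) : Int) + 2))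
        = (cs.drop (f.toNat + 1)).take 1 := by
      have e1 : (((f.toNat : Nat) : Int) + 1) = (((f.toNat + 1 : Nat) : Nat) : Int) := by push_cast; ring
      have e2 : (((f.toNat : Nat) : Int) + 2) = (((f.toNat + 2 : Nat) : Nat) : Int) := by push_cast; ring
      rw [e1, e2]
      simp only [PySem.Chars.slice_eq_listSlice]
      rw [PySem.List.slice_natCast]
      rw [show f.toNat + 2 - (f.toNat + 1) = 1 from by omega]
    rw [hs1, hs2]
    have hdd : cs.drop (f.toNat + 2) = (cs.drop (f.toNat + 1)).drop 1 := by
      rw [List.drop_drop]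
    simp [List.flatten_append, max_eq_left hf0]

-- ===== VERDICT (by name: the statement is the Claim_ definition above) =====
theorem gAAAAABmuqBgrHH9Mv_plVN1LzgVJw5afJ5Z_2Dnqo3IOEmV_M0NPg3QbGMY1ePWKWYvMw5pa0QGhqu0MVmzuu52Gf5TjvxYPQ___spec : Claim_equal_gAAAAABmuqBgrHH9Mv_plVN1LzgVJw5afJ5Z_2Dnqo3IOEmV_M0NPg3QbGMY1ePWKWYvMw5pa0QGhqu0MVmzuu52Gf5TjvxYPQ__ := by
  intro text _
  show gAAAAABmuqBgrHH9Mv_plVN1LzgVJw5afJ5Z_2Dnqo3IOEmV_M0NPg3QbGMY1ePWKWYvMw5pa0QGhqu0MVmzuu52Gf5TjvxYPQ__ text = gAAAAABmuqBgrHH9Mv_plVN1LzgVJw5afJ5Z_2Dnqo3IOEmV_M0NPg3QbGMY1ePWKWYvMw5pa0QGhqu0MVmzuu52Gf5TjvxYPQ___alt text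
  unfold gAAAAABmuqBgrHH9Mv_plVN1LzgVJw5afJ5Z_2Dnqo3IOEmV_M0NPg3QbGMY1ePWKWYvMw5pa0QGhqu0MVmzuu52Gf5TjvxYPQ__ gAAAAABmuqBgrHH9Mv_plVN1LzgVJw5afJ5Z_2Dnqo3IOEmV_M0NPg3QbGMY1ePWKWYvMw5pa0QGhqu0MVmzuu52Gf5TjvxYPQ___alt
  rw [pvLoopA_eq]
  simp
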